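-- pv_equiv track=rewrite | github.com/blisky-li/predictprice | PREDICT/strategy/calculate_up_down.py | func
-- ===== SOURCE A (Python) =====
-- def func(lst,num,mode):
--     lst2 = []
--     ans = 0
--     length = len(lst)
--     # 单调递减
--     if mode == True:
--         temp = 0
--         for i in range(length):
--             if lst[i] == 0:
--                 temp += 1
--                 if (temp == num and i == length-1) or (temp == num and i!= length-1 and lst[i+1] == 1):
--                     lst2.append(i)
--                     ans += 1
--                     temp = 0
--             else:
--                 temp = 0
--     # 单调递增
--     else:
--         temp = 0
--         for i in range(length):
--             if lst[i] == 1: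
--                 temp += 1
--                 if (temp == num and i == length-1) or (temp == num and i!= length-1 and lst[i+1] == 0):
--                     lst2.append(i)
--                     ans += 1
--                     temp = 0
--             else:
--                 temp = 0
--     return ans, lst2
-- ===== SOURCE B (Python) =====
-- def func(lst, num, mode):
--     # one parameterized pass: collect maximal runs of the target value, then filter
--     target = 0 if mode else 1
--     opp = 1 - target
--     n = len(lst)
--     runs = []
--     start = None
--     for j, x in enumerate(lst):
--         if x == target:
--             if start is None:
--                 start = j
--         else:
--             if start is not None:
--                 runs.append((start, j - 1))
--                 start = None
--     if start is not None:
--         runs.append((start, n - 1))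
--     lst2 = [e for (s, e) in runs
--             if e - s + 1 == num and (e == n - 1 or lst[e + 1] == opp)]
--     return len(lst2), lst2
-- ===== Notes on version B (the rewrite author's own statement) =====
-- stated objective: alternative
-- what changed: Instead of A's per-index counter with two duplicated mode branches, B makes one parameterized pass that collects the maximal runs of the target value as (start,end) segments and then filters them by exact length num and a closing opposite value (or list end).
import Mathlib
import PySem

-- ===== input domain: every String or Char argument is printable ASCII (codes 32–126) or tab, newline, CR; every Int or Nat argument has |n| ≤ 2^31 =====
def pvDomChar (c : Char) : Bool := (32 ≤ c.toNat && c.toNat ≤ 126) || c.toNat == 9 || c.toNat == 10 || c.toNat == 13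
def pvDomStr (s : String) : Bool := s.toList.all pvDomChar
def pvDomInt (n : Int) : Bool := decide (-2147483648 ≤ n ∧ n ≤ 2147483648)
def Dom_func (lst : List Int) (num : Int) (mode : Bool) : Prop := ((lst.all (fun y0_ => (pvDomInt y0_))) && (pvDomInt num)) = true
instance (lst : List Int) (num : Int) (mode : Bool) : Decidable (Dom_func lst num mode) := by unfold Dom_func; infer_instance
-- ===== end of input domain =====

-- B replaces A's per-index counter with duplicated mode branches by one parameterized pass
-- collecting maximal runs of the target value, then filtering them (objective: alternative).

-- ===== PORT A =====
def func (lst : List Int) (num : Int) (mode : Bool) : Int × List Int :=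
  let lst2 : List Int := []
  let ans : Int := 0
  let length : Int := (lst.length : Int)
  if mode = true then
    let r := (PySem.List.pyRange 0 length 1).foldl
      (fun (st : Int × Int × List Int) (i : Int) =>
        if PySem.List.pyGetD lst i 0 = 0 then
          let temp := st.1 + 1
          if (temp = num ∧ i = length - 1) ∨
             (temp = num ∧ i ≠ length - 1 ∧ PySem.List.pyGetD lst (i + 1) 0 = 1) then
            (0, st.2.1 + 1, st.2.2 ++ [i])
          else (temp, st.2.1, st.2.2)
        else (0, st.2.1, st.2.2))
      (0, ans, lst2)
    (r.2.1, r.2.2)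
  else
    let r := (PySem.List.pyRange 0 length 1).foldl
      (fun (st : Int × Int × List Int) (i : Int) =>
        if PySem.List.pyGetD lst i 0 = 1 then
          let temp := st.1 + 1
          if (temp = num ∧ i = length - 1) ∨
             (temp = num ∧ i ≠ length - 1 ∧ PySem.List.pyGetD lst (i + 1) 0 = 0) then
            (0, st.2.1 + 1, st.2.2 ++ [i])
          else (temp, st.2.1, st.2.2)
        else (0, st.2.1, st.2.2))
      (0, ans, lst2)
    (r.2.1, r.2.2)

-- ===== PORT B =====
def func_alt (lst : List Int) (num : Int) (mode : Bool) : Int × List Int :=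
  let target : Int := if mode then 0 else 1
  let opp : Int := 1 - target
  let n : Int := (lst.length : Int)
  let st := (PySem.List.enumerate lst 0).foldl
    (fun (st : List (Int × Int) × Option Int) (jx : Int × Int) =>
      if jx.2 = target then
        match st.2 with
        | none => (st.1, some jx.1)
        | some _ => st
      else
        match st.2 with
        | some s => (st.1 ++ [(s, jx.1 - 1)], none)
        | none => st)
    ([], none)
  let runs := match st.2 with
    | some s => st.1 ++ [(s, n - 1)]
    | none => st.1
  let lst2 := (runs.filter (fun se =>
      decide (se.2 - se.1 + 1 = num ∧ (se.2 = n - 1 ∨ PySem.List.pyGetD lst (se.2 + 1) 0 = opp)))).map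
      (fun se => se.2)
  ((lst2.length : Int), lst2)

-- ===== PRECONDITION & SPEC =====
def Spec_func (lst : List Int) (num : Int) (mode : Bool) (out : Int × List Int) : Prop := out = func_alt lst num mode
instance (lst : List Int) (num : Int) (mode : Bool) (out : Int × List Int) : Decidable (Spec_func lst num mode out) := by unfold Spec_func; infer_instance

-- ===== CLAIM (what is proved, stated in full; the proofs are below) =====
def Claim_equal_func : Prop := ∀ (lst : List Int) (num : Int) (mode : Bool), Dom_func lst num mode → Spec_func lst num mode (func lst num mode)

-- ===== LEMMAS AND PROOFS =====

/-- A's loop, as structural recursion over the remaining suffix of the list. -/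
def goA (num t opp : Int) : List Int → Nat → Int → Int → List Int → Int × List Int
  | [], _, _, ans, acc => (ans, acc)
  | x :: rest, j, temp, ans, acc =>
    if x = t then
      if (temp + 1 = num ∧ rest = []) ∨
         (temp + 1 = num ∧ rest ≠ [] ∧ rest.head? = some opp) then
        goA num t opp rest (j + 1) 0 (ans + 1) (acc ++ [(j : Int)])
      else goA num t opp rest (j + 1) (temp + 1) ans acc
    else goA num t opp rest (j + 1) 0 ans acc

/-- B's run collection, as structural recursion over the remaining suffix. -/
def segsF (lst : List Int) (t : Int) : List Int → Nat → Option Int → List (Int × Int)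
  | [], _, cur =>
    match cur with
    | some s => [(s, (lst.length : Int) - 1)]
    | none => []
  | x :: rest, j, cur =>
    if x = t then
      match cur with
      | none => segsF lst t rest (j + 1) (some (j : Int))
      | some s => segsF lst t rest (j + 1) (some s)
    else
      match cur with
      | some s => (s, (j : Int) - 1) :: segsF lst t rest (j + 1) none
      | none => segsF lst t rest (j + 1) none

/-- B's filter predicate. -/
def pB (lst : List Int) (num opp : Int) (se : Int × Int) : Bool :=
  decide (se.2 - se.1 + 1 = num ∧ (se.2 = (lst.length : Int) - 1 ∨ PySem.List.pyGetD lst (se.2 + 1) 0 = opp))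

lemma foldA_eq_goA (lst : List Int) (num t opp : Int) :
    ∀ (xs : List Int) (j : Nat), xs = lst.drop j → j ≤ lst.length →
    ∀ (temp ans : Int) (acc : List Int),
    (((PySem.List.pyRange (j : Int) (lst.length : Int) 1).foldl
      (fun (st : Int × Int × List Int) (i : Int) =>
        if PySem.List.pyGetD lst i 0 = t then
          let temp := st.1 + 1
          if (temp = num ∧ i = (lst.length : Int) - 1) ∨
             (temp = num ∧ i ≠ (lst.length : Int) - 1 ∧ PySem.List.pyGetD lst (i + 1) 0 = opp) then
            (0, st.2.1 + 1, st.2.2 ++ [i])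
          else (temp, st.2.1, st.2.2)
        else (0, st.2.1, st.2.2))
      (temp, ans, acc)).2.1,
     ((PySem.List.pyRange (j : Int) (lst.length : Int) 1).foldl
      (fun (st : Int × Int × List Int) (i : Int) =>
        if PySem.List.pyGetD lst i 0 = t then
          let temp := st.1 + 1
          if (temp = num ∧ i = (lst.length : Int) - 1) ∨
             (temp = num ∧ i ≠ (lst.length : Int) - 1 ∧ PySem.List.pyGetD lst (i + 1) 0 = opp) then
            (0, st.2.1 + 1, st.2.2 ++ [i])
          else (temp, st.2.1, st.2.2)
        else (0, st.2.1, st.2.2))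
      (temp, ans, acc)).2.2) = goA num t opp xs j temp ans acc := by
  intro xs
  induction xs with
  | nil =>
    intro j hxs hj temp ans acc
    have hjl : lst.length ≤ j := by
      have := congrArg List.length hxs
      simp [List.length_drop] at this
      omega
    rw [PySem.List.pyRange_one_eq_nil (by exact_mod_cast hjl)]
    simp [goA]
  | cons x rest ih =>
    intro j hxs hj temp ans acc
    have hlen := congrArg List.length hxs
    simp only [List.length_cons, List.length_drop] at hlen
    have hjlt : j < lst.length := by omega
    have hcd : x :: rest = lst[j] :: lst.drop (j + 1) :=
      hxs.trans (List.getElem_cons_drop hjlt).symm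
    have hx : x = lst[j] := by injection hcd
    have hrest : rest = lst.drop (j + 1) := by injection hcd
    subst hx
    subst hrest
    rw [PySem.List.pyRange_one_cons (by exact_mod_cast hjlt)]
    simp only [List.foldl_cons, goA, PySem.List.pyGetD_natCast,
      List.getD_eq_getElem?_getD, List.getElem?_eq_getElem hjlt, Option.getD_some]
    by_cases h1 : lst[j] = t
    · simp only [if_pos h1]
      have hA : ((j : Int) = (lst.length : Int) - 1) ↔ lst.drop (j + 1) = [] := by
        rw [List.drop_eq_nil_iff]
        omega
      have hB : lst.drop (j + 1) ≠ [] →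
          (PySem.List.pyGetD lst ((j : Int) + 1) 0 = opp ↔ (lst.drop (j + 1)).head? = some opp) := by
        intro hne
        have hj1 : j + 1 < lst.length := by
          rcases Nat.lt_or_ge (j + 1) lst.length with h | h
          · exact h
          · exact absurd (List.drop_eq_nil_iff.mpr h) hne
        have hg : PySem.List.pyGetD lst ((j : Int) + 1) 0 = lst[j + 1] := by
          have := PySem.List.pyGetD_natCast (xs := lst) (n := j + 1) (d := 0)
          push_cast at this
          rw [this, List.getD_eq_getElem?_getD, List.getElem?_eq_getElem hj1]
          rfl
        rw [hg, List.head?_drop, List.getElem?_eq_getElem hj1]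
        simp
      by_cases hc : (temp + 1 = num ∧ lst.drop (j + 1) = []) ∨
          (temp + 1 = num ∧ lst.drop (j + 1) ≠ [] ∧ (lst.drop (j + 1)).head? = some opp)
      · have hc1 : (temp + 1 = num ∧ (j : Int) = (lst.length : Int) - 1) ∨
            (temp + 1 = num ∧ (j : Int) ≠ (lst.length : Int) - 1 ∧
              PySem.List.pyGetD lst ((j : Int) + 1) 0 = opp) := by
          rcases hc with ⟨hn, he⟩ | ⟨hn, hne, hh⟩
          · exact Or.inl ⟨hn, hA.mpr he⟩
          · exact Or.inr ⟨hn, fun h => hne (hA.mp h), (hB hne).mpr hh⟩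
        rw [if_pos hc, if_pos hc1]
        have := ih (j + 1) rfl (by omega) 0 (ans + 1) (acc ++ [(j : Int)])
        push_cast at this ⊢
        exact this
      · have hc1 : ¬ ((temp + 1 = num ∧ (j : Int) = (lst.length : Int) - 1) ∨
            (temp + 1 = num ∧ (j : Int) ≠ (lst.length : Int) - 1 ∧
              PySem.List.pyGetD lst ((j : Int) + 1) 0 = opp)) := by
          rintro (⟨hn, he⟩ | ⟨hn, hne, hh⟩)
          · exact hc (Or.inl ⟨hn, hA.mp he⟩)
          · have hrne : lst.drop (j + 1) ≠ [] := fun h => hne (hA.mpr h)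
            exact hc (Or.inr ⟨hn, hrne, (hB hrne).mp hh⟩)
        rw [if_neg hc, if_neg hc1]
        have := ih (j + 1) rfl (by omega) (temp + 1) ans acc
        push_cast at this ⊢
        exact this
    · simp only [if_neg h1]
      have := ih (j + 1) rfl (by omega) 0 ans acc
      push_cast at this ⊢
      exact this

lemma goA_eq_segsF (lst : List Int) (num t opp : Int) (ht : t ≠ opp) :
    ∀ (xs : List Int) (j : Nat), xs = lst.drop j → j ≤ lst.length →
    ∀ (ans : Int) (acc : List Int) (cur : Option Int),
    (match cur with
     | some s => ((j : Int) - s = num → ¬(xs = [] ∨ xs.head? = some opp))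
     | none => True) →
    goA num t opp xs j (match cur with | some s => (j : Int) - s | none => 0) ans acc
      = (ans + (((segsF lst t xs j cur).filter (pB lst num opp)).length : Int),
         acc ++ ((segsF lst t xs j cur).filter (pB lst num opp)).map (fun se => se.2)) := by
  intro xs
  induction xs with
  | nil =>
    intro j hxs hj ans acc cur H
    cases cur with
    | none => simp [goA, segsF]
    | some s =>
      have hjl : j = lst.length := by
        have := congrArg List.length hxs
        simp [List.length_drop] at this
        omega
      have hnum : ¬ ((j : Int) - s = num) := fun h => H h (Or.inl rfl)
      have hp : pB lst num opp (s, (lst.length : Int) - 1) = false := by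
        simp only [pB, decide_eq_false_iff_not]
        rintro ⟨h, _⟩
        subst hjl
        omega
      simp [goA, segsF, hp]
  | cons x rest ih =>
    intro j hxs hj ans acc cur H
    have hlen := congrArg List.length hxs
    simp only [List.length_cons, List.length_drop] at hlen
    have hjlt : j < lst.length := by omega
    have hcd : x :: rest = lst[j] :: lst.drop (j + 1) :=
      hxs.trans (List.getElem_cons_drop hjlt).symm
    have hx : x = lst[j] := by injection hcd
    have hrest : rest = lst.drop (j + 1) := by injection hcd
    simp only [goA, segsF]
    by_cases h1 : x = t
    · simp only [if_pos h1]
      -- unify the two cur cases via the start index s'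
      have main : ∀ s' : Int,
          goA num t opp (x :: rest) j ((j : Int) - s') ans acc
            = (ans + (((segsF lst t rest (j + 1) (some s')).filter (pB lst num opp)).length : Int),
               acc ++ ((segsF lst t rest (j + 1) (some s')).filter (pB lst num opp)).map (fun se => se.2)) := by
        intro s'
        simp only [goA, if_pos h1]
        by_cases hc : ((j : Int) - s' + 1 = num ∧ rest = []) ∨
            ((j : Int) - s' + 1 = num ∧ rest ≠ [] ∧ rest.head? = some opp)
        · rw [if_pos hc]
          rcases hc with ⟨hn, hre⟩ | ⟨hn, hne, hh⟩
          · have hlen2 : j + 1 = lst.length := by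
              rw [hre] at hrest
              have := congrArg List.length hrest
              simp [List.length_drop] at this
              omega
            have hp : pB lst num opp (s', (lst.length : Int) - 1) = true := by
              simp only [pB, decide_eq_true_eq]
              exact ⟨by omega, by simp⟩

            subst hre
            simp [goA, segsF, hp]
            omega
          · rcases rest with _ | ⟨y, rest'⟩
            · exact absurd rfl hne
            have hy : y = opp := by injection hh
            have hyt : ¬ (y = t) := fun h => ht (h.symm.trans hy)
            have hj1 : j + 1 < lst.length := by
              have := congrArg List.length hrest
              simp [List.length_drop] at this
              omega
            have hy2 : y = lst[j + 1] := by
              have : y :: rest' = lst[j + 1] :: lst.drop (j + 2) := by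
                rw [hrest]
                exact (List.getElem_cons_drop hj1).symm
              injection this
            have hgd : PySem.List.pyGetD lst (((j : Int) + 1 - 1) + 1) 0 = lst[j + 1] := by
              have harith : ((j : Int) + 1 - 1) + 1 = ((j + 1 : Nat) : Int) := by push_cast; ring
              rw [harith, PySem.List.pyGetD_natCast, List.getD_eq_getElem?_getD,
                List.getElem?_eq_getElem hj1]
              rfl
            have hp : pB lst num opp (s', ((j + 1 : Nat) : Int) - 1) = true := by
              simp only [pB, decide_eq_true_eq]
              constructor
              · push_cast; omega
              · refine Or.inr ?_
                push_cast
                rw [hgd, ← hy2, hy]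
            have hih := ih (j + 1) hrest (by omega) (ans + 1) (acc ++ [(j : Int)]) none trivial
            simp only [segsF, if_neg hyt] at hih ⊢
            rw [hih, List.filter_cons_of_pos hp]
            simp only [Prod.mk.injEq, List.length_cons, List.map_cons]
            have harith2 : ((j : Nat) : Int) + 1 - 1 = (j : Int) := by ring
            constructor
            · push_cast; ring
            · push_cast; rw [harith2]; simp
        · rw [if_neg hc]
          have H' : ((j + 1 : Nat) : Int) - s' = num → ¬(rest = [] ∨ rest.head? = some opp) := by
            intro hn hor
            rcases hor with h | h
            · exact hc (Or.inl ⟨by push_cast at hn ⊢; omega, h⟩)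
            · refine hc (Or.inr ⟨by push_cast at hn ⊢; omega, ?_, h⟩)
              intro he
              rw [he] at h
              simp at h
          have hih := ih (j + 1) hrest (by omega) ans acc (some s') H'
          have harg : (j : Int) - s' + 1 = ((j + 1 : Nat) : Int) - s' := by push_cast; ring
          rw [harg]
          exact hih
      cases cur with
      | none =>
        have := main (j : Int)
        simp only [goA, if_pos h1, sub_self] at this ⊢
        exact this
      | some s =>
        have := main s
        simp only [goA, if_pos h1] at this ⊢
        exact this
    · simp only [if_neg h1]
      cases cur with
      | none => exact ih (j + 1) hrest (by omega) ans acc none trivial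
      | some s =>
        have hp : pB lst num opp (s, (j : Int) - 1) = false := by
          simp only [pB, decide_eq_false_iff_not]
          rintro ⟨hn, hor⟩
          have hnum : (j : Int) - s = num := by omega
          have hx' : x ≠ opp := by
            intro h
            exact H hnum (Or.inr (by simp [h]))
          rcases hor with h | h
          · omega
          · have harith : (j : Int) - 1 + 1 = (j : Int) := by ring
            rw [harith, PySem.List.pyGetD_natCast, List.getD_eq_getElem?_getD,
              List.getElem?_eq_getElem hjlt] at h
            exact hx' (hx.trans h)
        rw [List.filter_cons_of_neg (by simp [hp])]
        exact ih (j + 1) hrest (by omega) ans acc none trivial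

lemma foldB_eq_segsF (lst : List Int) (t : Int) :
    ∀ (xs : List Int) (j : Nat) (runs : List (Int × Int)) (cur : Option Int),
    (let st := (PySem.List.enumerate xs (j : Int)).foldl
      (fun (st : List (Int × Int) × Option Int) (jx : Int × Int) =>
        if jx.2 = t then
          match st.2 with
          | none => (st.1, some jx.1)
          | some _ => st
        else
          match st.2 with
          | some s => (st.1 ++ [(s, jx.1 - 1)], none)
          | none => st)
      (runs, cur);
     (match st.2 with
      | some s => st.1 ++ [(s, (lst.length : Int) - 1)]
      | none => st.1)) = runs ++ segsF lst t xs j cur := by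
  intro xs
  induction xs with
  | nil =>
    intro j runs cur
    simp only [PySem.List.enumerate_nil, List.foldl_nil, segsF]
    cases cur <;> simp
  | cons x rest ih =>
    intro j runs cur
    simp only [PySem.List.enumerate_cons, List.foldl_cons, segsF]
    by_cases hx : x = t
    · simp only [hx]
      cases cur with
      | none =>
        have := ih (j + 1) runs (some (j : Int))
        simpa [Nat.cast_add] using this
      | some s =>
        have := ih (j + 1) runs (some s)
        simpa [Nat.cast_add] using this
    · simp only [if_neg hx]
      cases cur with
      | none =>
        have := ih (j + 1) runs none
        simpa [Nat.cast_add] using this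
      | some s =>
        have := ih (j + 1) (runs ++ [(s, (j : Int) - 1)]) none
        simp only [Nat.cast_add, Nat.cast_one] at this
        rw [this, List.append_assoc]
        simp

-- ===== VERDICT (by name: the statement is the Claim_ definition above) =====
theorem func_spec : Claim_equal_func := by
  unfold Claim_equal_func
  intro lst num mode _
  unfold Spec_func
  cases mode with
  | true =>
    have h1 : func lst num true = goA num 0 1 lst 0 0 0 [] := by
      have := foldA_eq_goA lst num 0 1 lst 0 (by simp) (by simp) 0 0 []
      simpa [func] using this
    have h2 := goA_eq_segsF lst num 0 1 (by norm_num) lst 0 (by simp) (by simp) 0 [] none trivial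
    have h3 : func_alt lst num true =
        ((((((segsF lst 0 lst 0 none).filter (pB lst num 1)).map (fun se => se.2)).length : Nat) : Int),
          (((segsF lst 0 lst 0 none).filter (pB lst num 1)).map (fun se => se.2))) := by
      have hf := foldB_eq_segsF lst 0 lst 0 [] none
      simp only [Nat.cast_zero, List.nil_append] at hf
      simp only [func_alt, if_true]
      rw [show ((1 : Int) - 0) = 1 by norm_num, hf]
      rfl
    simp only [h1, h2, h3] at *
    simp
  | false =>
    have h1 : func lst num false = goA num 1 0 lst 0 0 0 [] := by
      have := foldA_eq_goA lst num 1 0 lst 0 (by simp) (by simp) 0 0 []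
      simpa [func] using this
    have h2 := goA_eq_segsF lst num 1 0 (by norm_num) lst 0 (by simp) (by simp) 0 [] none trivial
    have h3 : func_alt lst num false =
        ((((((segsF lst 1 lst 0 none).filter (pB lst num 0)).map (fun se => se.2)).length : Nat) : Int),
          (((segsF lst 1 lst 0 none).filter (pB lst num 0)).map (fun se => se.2))) := by
      have hf := foldB_eq_segsF lst 1 lst 0 [] none
      simp only [Nat.cast_zero, List.nil_append] at hf
      simp only [func_alt, Bool.false_eq_true, if_false]
      rw [show ((1 : Int) - 1) = 0 by norm_num, hf]
      rfl
    simp only [h1, h2, h3] at *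
    simp
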